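-- pv_equiv track=rewrite | github.com/DarkAlexWang/leetcode | Amazon/OnlineAssessment/minimum_group_of_array.py | minimum_group_of_array
-- ===== SOURCE A (Python) =====
-- def minimum_group_of_array(arr, k):
--     arr.sort()
--     idx = 0
--     res = 1
--     for i in range(len(arr)):
--         if arr[i] - arr[idx] > k:
--             res += 1
--             idx = i
--     return res
-- ===== SOURCE B (Python) =====
-- def _upper_bound(arr, x, lo):
--     """First index j in [lo, len(arr)) with arr[j] > x (len(arr) if none); binary search."""
--     hi = len(arr)
--     while lo < hi:
--         mid = (lo + hi) // 2
--         if arr[mid] <= x: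
--             lo = mid + 1
--         else:
--             hi = mid
--     return lo
--
--
-- def minimum_group_of_array(arr, k):
--     arr.sort()
--     n = len(arr)
--     res = 1
--     lead = 0  # current group leader (last break position)
--     i = 0     # scan position
--     while i < n:
--         # next break: first index >= i whose value exceeds the leader's by more than k
--         j = _upper_bound(arr, arr[lead] + k, i)
--         if j < n:
--             res += 1
--             lead = j
--         i = j + 1
--     return res
-- ===== Notes on version B (the rewrite author's own statement) =====
-- stated objective: alternative
-- what changed: Replaces A's element-by-element scan carrying a leader index with a while loop that binary-searches (hand-written upper bound) from the scan position for the next break and jumps straight to it, so the per-element comparison loop disappears.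
import Mathlib
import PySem

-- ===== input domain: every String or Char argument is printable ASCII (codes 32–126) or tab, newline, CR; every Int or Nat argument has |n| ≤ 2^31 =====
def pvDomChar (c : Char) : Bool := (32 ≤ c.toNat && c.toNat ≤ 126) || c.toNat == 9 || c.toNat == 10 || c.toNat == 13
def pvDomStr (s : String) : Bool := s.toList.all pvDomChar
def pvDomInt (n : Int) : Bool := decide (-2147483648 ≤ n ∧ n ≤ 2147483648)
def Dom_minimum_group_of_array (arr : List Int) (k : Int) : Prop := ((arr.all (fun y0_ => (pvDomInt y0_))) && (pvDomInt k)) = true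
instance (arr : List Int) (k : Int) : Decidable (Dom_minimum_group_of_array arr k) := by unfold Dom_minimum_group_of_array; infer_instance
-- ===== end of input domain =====

-- B replaces A's element-by-element scan by a while loop that binary-searches (a hand-written upper
-- bound) for the next group break and jumps straight to it (objective: alternative algorithm).
-- Both A and B sort arr in place (the same mutation); the equivalence proved is about the return value.


-- ===== PORT A =====
-- A's loop body as a named step; p = (idx, res). Indices produced by range are always in range,
-- so List.getD is exact for Python's arr[i] here (same below for B).
def aStep (s : List Int) (k : Int) (p : Nat × Int) (i : Nat) : Nat × Int :=
  if s.getD i 0 - s.getD p.1 0 > k then (i, p.2 + 1) else p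

def minimum_group_of_array (arr : List Int) (k : Int) : Int :=
  let s := PySem.List.sorted arr (fun x => x) false
  ((List.range s.length).foldl (aStep s k) (0, 1)).2

-- ===== PORT B =====
-- Source B's _upper_bound while loop, fuel-bounded structural recursion (fuel = hi - lo is exactly the
-- number of halvings the Python loop can still make; each step shrinks hi - lo, so it never runs out).
def ubFuel (s : List Int) (x : Int) : Nat → Nat → Nat → Nat
  | 0, lo, _hi => lo
  | fuel + 1, lo, hi =>
    if lo < hi then
      if s.getD ((lo + hi) / 2) 0 ≤ x then ubFuel s x fuel ((lo + hi) / 2 + 1) hi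
      else ubFuel s x fuel lo ((lo + hi) / 2)
    else lo

-- Source B's _upper_bound(arr, x, lo): first index j in [lo, len(arr)) with arr[j] > x (len if none).
def ubAux (s : List Int) (x : Int) (lo hi : Nat) : Nat := ubFuel s x (hi - lo) lo hi

-- Source B's while loop: lead = current group leader, i = scan position, j = next break; fuel = n - i
-- bounds the remaining iterations (each iteration moves i to j + 1 ≥ i + 1, so fuel never runs out).
def altFuel (s : List Int) (k : Int) (n : Nat) : Nat → Nat → Nat → Int → Int
  | 0, _lead, _i, res => res
  | fuel + 1, lead, i, res =>
    if i < n then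
      let j := ubAux s (s.getD lead 0 + k) i n
      if j < n then altFuel s k n fuel j (j + 1) (res + 1)
      else altFuel s k n fuel lead (j + 1) res
    else res

def minimum_group_of_array_alt (arr : List Int) (k : Int) : Int :=
  let s := PySem.List.sorted arr (fun x => x) false
  altFuel s k s.length s.length 0 0 1

-- ===== PRECONDITION & SPEC =====
def Spec_minimum_group_of_array (arr : List Int) (k : Int) (out : Int) : Prop := out = minimum_group_of_array_alt arr k
instance (arr : List Int) (k : Int) (out : Int) : Decidable (Spec_minimum_group_of_array arr k out) := by unfold Spec_minimum_group_of_array; infer_instance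

-- ===== CLAIM (what is proved, stated in full; the proofs are below) =====
def Claim_equal_minimum_group_of_array : Prop := ∀ (arr : List Int) (k : Int), Dom_minimum_group_of_array arr k → Spec_minimum_group_of_array arr k (minimum_group_of_array arr k)

-- ===== LEMMAS AND PROOFS =====

-- the sorted list, read through getD, is monotone
def Mono (s : List Int) : Prop :=
  ∀ i j : Nat, i < s.length → j < s.length → i ≤ j → s.getD i 0 ≤ s.getD j 0

theorem mono_sorted (arr : List Int) : Mono (PySem.List.sorted arr (fun x => x) false) := by
  intro i j hi hj hij
  rcases Nat.eq_or_lt_of_le hij with rfl | h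
  · exact le_refl _
  · have hp := PySem.List.sorted_pairwise arr (fun x => x)
    rw [List.pairwise_iff_getElem] at hp
    rw [List.getD_eq_getElem _ _ hi, List.getD_eq_getElem _ _ hj]
    exact hp i j hi hj h

theorem le_ubFuel (s : List Int) (x : Int) :
    ∀ (fuel lo hi : Nat), lo ≤ ubFuel s x fuel lo hi := by
  intro fuel
  induction fuel with
  | zero => intro lo hi; exact le_refl _
  | succ f ih =>
    intro lo hi
    simp only [ubFuel]
    split_ifs with h hc
    · have := ih ((lo + hi) / 2 + 1) hi; omega
    · exact ih lo ((lo + hi) / 2)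
    · exact le_refl _

theorem ubFuel_le_max (s : List Int) (x : Int) :
    ∀ (fuel lo hi : Nat), ubFuel s x fuel lo hi ≤ max lo hi := by
  intro fuel
  induction fuel with
  | zero => intro lo hi; simp [ubFuel]
  | succ f ih =>
    intro lo hi
    simp only [ubFuel]
    split_ifs with h hc
    · have := ih ((lo + hi) / 2 + 1) hi; omega
    · have := ih lo ((lo + hi) / 2); omega
    · omega

theorem ubFuel_all_le (s : List Int) (x : Int) (ms : Mono s) :
    ∀ (fuel lo hi : Nat), hi - lo ≤ fuel → hi ≤ s.length →
      ∀ m, lo ≤ m → m < ubFuel s x fuel lo hi → s.getD m 0 ≤ x := by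
  intro fuel
  induction fuel with
  | zero =>
    intro lo hi h0 _ m hm hmu
    simp only [ubFuel] at hmu
    omega
  | succ f ih =>
    intro lo hi hf hlen m hm hmu
    simp only [ubFuel] at hmu
    by_cases h : lo < hi
    · rw [if_pos h] at hmu
      by_cases hc : s.getD ((lo + hi) / 2) 0 ≤ x
      · rw [if_pos hc] at hmu
        by_cases hmmid : m ≤ (lo + hi) / 2
        · exact le_trans (ms m ((lo + hi) / 2) (by omega) (by omega) hmmid) hc
        · exact ih ((lo + hi) / 2 + 1) hi (by omega) hlen m (by omega) hmu
      · rw [if_neg hc] at hmu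
        exact ih lo ((lo + hi) / 2) (by omega) (by omega) m hm hmu
    · rw [if_neg h] at hmu
      omega

theorem ubFuel_gt (s : List Int) (x : Int) :
    ∀ (fuel lo hi : Nat), hi - lo ≤ fuel → ubFuel s x fuel lo hi < hi →
      x < s.getD (ubFuel s x fuel lo hi) 0 := by
  intro fuel
  induction fuel with
  | zero =>
    intro lo hi h0 hlt
    simp only [ubFuel] at hlt ⊢
    omega
  | succ f ih =>
    intro lo hi hf hlt
    simp only [ubFuel] at hlt ⊢
    by_cases h : lo < hi
    · rw [if_pos h] at hlt ⊢
      by_cases hc : s.getD ((lo + hi) / 2) 0 ≤ x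
      · rw [if_pos hc] at hlt ⊢
        exact ih ((lo + hi) / 2 + 1) hi (by omega) hlt
      · rw [if_neg hc] at hlt ⊢
        have hle := ubFuel_le_max s x f lo ((lo + hi) / 2)
        by_cases heq : ubFuel s x f lo ((lo + hi) / 2) < (lo + hi) / 2
        · exact ih lo ((lo + hi) / 2) (by omega) heq
        · have heq2 : ubFuel s x f lo ((lo + hi) / 2) = (lo + hi) / 2 := by omega
          rw [heq2]; omega
    · rw [if_neg h] at hlt
      omega

theorem le_ubAux (s : List Int) (x : Int) (lo hi : Nat) : lo ≤ ubAux s x lo hi :=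
  le_ubFuel s x (hi - lo) lo hi

theorem ubAux_le_max (s : List Int) (x : Int) (lo hi : Nat) : ubAux s x lo hi ≤ max lo hi :=
  ubFuel_le_max s x (hi - lo) lo hi

theorem ubAux_all_le (s : List Int) (x : Int) (ms : Mono s) (lo hi : Nat) (hlen : hi ≤ s.length) :
    ∀ m, lo ≤ m → m < ubAux s x lo hi → s.getD m 0 ≤ x :=
  ubFuel_all_le s x ms (hi - lo) lo hi (le_refl _) hlen

theorem ubAux_gt (s : List Int) (x : Int) (lo hi : Nat) (hlt : ubAux s x lo hi < hi) :
    x < s.getD (ubAux s x lo hi) 0 :=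
  ubFuel_gt s x (hi - lo) lo hi (le_refl _) hlt

theorem altFuel_stop (s : List Int) (k : Int) (n : Nat) :
    ∀ (fuel lead i : Nat) (res : Int), ¬ i < n → altFuel s k n fuel lead i res = res := by
  intro fuel lead i res h
  cases fuel with
  | zero => rfl
  | succ f => simp only [altFuel, if_neg h]

-- A's step leaves the state unchanged over a stretch with no break
theorem fold_nobreak (s : List Int) (k : Int) (lead : Nat) (res : Int) :
    ∀ l : List Nat, (∀ i ∈ l, s.getD i 0 - s.getD lead 0 ≤ k) →
      l.foldl (aStep s k) (lead, res) = (lead, res) := by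
  intro l
  induction l with
  | nil => intro _; rfl
  | cons a t ih =>
    intro h
    have ha : aStep s k (lead, res) a = (lead, res) := by
      simp only [aStep]
      rw [if_neg (by have := h a (by simp); omega)]
    rw [List.foldl_cons, ha]
    exact ih (fun i hi => h i (by simp [hi]))

-- A's scan from position i with leader `lead` computes exactly B's loop from (lead, i).
theorem main_eq (s : List Int) (k : Int) (ms : Mono s) :
    ∀ (fuel lead i : Nat) (res : Int), s.length - i ≤ fuel →
      ((List.range' i (s.length - i)).foldl (aStep s k) (lead, res)).2
        = altFuel s k s.length fuel lead i res := by
  intro fuel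
  induction fuel with
  | zero =>
    intro lead i res hf
    have h0 : s.length - i = 0 := by omega
    rw [h0]
    rfl
  | succ f ih =>
    intro lead i res hf
    by_cases hi : i < s.length
    · have hj1 : i ≤ ubAux s (s.getD lead 0 + k) i s.length :=
        le_ubAux s _ i s.length
      have hjn : ubAux s (s.getD lead 0 + k) i s.length ≤ s.length := by
        have := ubAux_le_max s (s.getD lead 0 + k) i s.length
        omega
      set j := ubAux s (s.getD lead 0 + k) i s.length with hjdef
      have hsplit : List.range' i (s.length - i)
          = List.range' i (j - i) ++ List.range' j (s.length - j) := by
        have h1 : i + 1 * (j - i) = j := by omega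
        have h2 : (j - i) + (s.length - j) = s.length - i := by omega
        rw [← h2, ← List.range'_append, h1]
      rw [hsplit, List.foldl_append]
      rw [fold_nobreak s k lead res _ (by
        intro m hm
        rw [List.mem_range'_1] at hm
        have := ubAux_all_le s (s.getD lead 0 + k) ms i s.length
          (le_refl _) m hm.1 (by rw [← hjdef]; omega)
        omega)]
      simp only [altFuel, if_pos hi, ← hjdef]
      by_cases hjlt : j < s.length
      · have hbreak : s.getD j 0 - s.getD lead 0 > k := by
          have := ubAux_gt s (s.getD lead 0 + k) i s.length (by rw [← hjdef]; omega)
          rw [← hjdef] at this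
          omega
        have hrs : List.range' j (s.length - j) = j :: List.range' (j + 1) (s.length - (j + 1)) := by
          have h3 : s.length - j = (s.length - (j + 1)) + 1 := by omega
          rw [h3, List.range'_succ]
        rw [hrs, List.foldl_cons]
        have hstep : aStep s k (lead, res) j = (j, res + 1) := by
          simp only [aStep]
          rw [if_pos hbreak]
        rw [hstep, if_pos hjlt]
        exact ih j (j + 1) (res + 1) (by omega)
      · have hje : j = s.length := by omega
        rw [hje]
        simp only [Nat.sub_self, List.range'_zero, List.foldl_nil]
        rw [if_neg (by omega : ¬ s.length < s.length)]
        exact (altFuel_stop s k s.length f lead (s.length + 1) res (by omega)).symm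
    · have h0 : s.length - i = 0 := by omega
      rw [h0]
      simp only [List.range'_zero, List.foldl_nil]
      exact (altFuel_stop s k s.length (f + 1) lead i res hi).symm

-- ===== VERDICT (by name: the statement is the Claim_ definition above) =====
theorem minimum_group_of_array_spec : Claim_equal_minimum_group_of_array := by
  intro arr k _dom
  unfold Spec_minimum_group_of_array minimum_group_of_array minimum_group_of_array_alt
  simp only []
  have := main_eq (PySem.List.sorted arr (fun x => x) false) k (mono_sorted arr)
    (PySem.List.sorted arr (fun x => x) false).length 0 0 1 (by omega)
  rw [List.range_eq_range']
  simpa using this
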